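-- pv_equiv track=rewrite | github.com/SidBaines/persona-shattering-lasr | scripts/visualisations/plot_ocean_poc.py | _model_order
-- ===== SOURCE A (Python) =====
-- def _model_order(rows: list[dict[str, str]]) -> list[str]:
--     preferred = [
--         "base",
--         "openness",
--         "conscientiousness",
--         "extraversion",
--         "agreeableness",
--         "neuroticism",
--         "combo",
--     ]
--     observed = {row.get("model", "") for row in rows if row.get("model")}
--     return [name for name in preferred if name in observed] + sorted(observed - set(preferred))
-- ===== SOURCE B (Python) =====
-- def _model_order(rows: list[dict[str, str]]) -> list[str]:
--     preferred = [
--         "base",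
--         "openness",
--         "conscientiousness",
--         "extraversion",
--         "agreeableness",
--         "neuroticism",
--         "combo",
--     ]
--     rank = {name: i for i, name in enumerate(preferred)}
--     observed = set()
--     for row in rows:
--         m = row.get("model", "")
--         if m:
--             observed.add(m)
--     return sorted(observed, key=lambda n: (rank.get(n, len(preferred)), n))
-- ===== Notes on version B (the rewrite author's own statement) =====
-- stated objective: alternative
-- what changed: Instead of filtering the preferred list against the observed set and separately sorting the remainder, B builds a rank dict over the preferred names and produces the whole result by one sort of the observed models with key (rank.get(name, len(preferred)), name).
import Mathlib
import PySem

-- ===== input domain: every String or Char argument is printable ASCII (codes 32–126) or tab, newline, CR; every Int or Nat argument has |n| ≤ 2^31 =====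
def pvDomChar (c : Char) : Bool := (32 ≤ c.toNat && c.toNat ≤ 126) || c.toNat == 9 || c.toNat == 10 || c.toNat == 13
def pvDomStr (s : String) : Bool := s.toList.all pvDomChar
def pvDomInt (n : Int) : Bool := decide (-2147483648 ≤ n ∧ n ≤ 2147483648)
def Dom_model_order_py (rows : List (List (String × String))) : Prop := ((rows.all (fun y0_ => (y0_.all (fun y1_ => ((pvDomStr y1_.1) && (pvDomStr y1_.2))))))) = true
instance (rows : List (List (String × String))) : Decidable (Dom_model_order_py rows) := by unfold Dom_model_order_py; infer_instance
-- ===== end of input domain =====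

-- B reorders the work: one sort of the observed models keyed by (preferred-rank, name) instead of A's
-- filter-of-preferred plus separate sort of the rest; same cost, different decomposition (objective: alternative).

-- the fixed preferred order (shared literal constant of both Pythons)
def pyPreferred : List String :=
  ["base", "openness", "conscientiousness", "extraversion", "agreeableness", "neuroticism", "combo"]

-- ===== PORT A =====
def model_order_py (rows : List (List (String × String))) : List String :=
  let preferred := pyPreferred
  -- observed = {row.get("model", "") for row in rows if row.get("model")}
  let observed : PySem.Set String := rows.foldl
    (fun s row =>
      match (PySem.Dict.mk row).get? "model" with
      | some m => if m ≠ "" then PySem.Set.add s ((PySem.Dict.mk row).getD "model" "") else s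
      | none => s) PySem.Set.empty
  preferred.filter (fun n => PySem.Set.contains observed n) ++
    PySem.List.sorted (PySem.Set.diff observed (PySem.Set.ofList preferred)) (fun x => x) false

-- ===== PORT B =====
-- rank = {name: i for i, name in enumerate(preferred)}
def pyRank : PySem.Dict String Int :=
  (PySem.List.enumerate pyPreferred 0).foldl (fun d p => d.insert p.2 p.1) PySem.Dict.empty

def model_order_py_alt (rows : List (List (String × String))) : List String :=
  let observed : PySem.Set String := rows.foldl
    (fun s row =>
      let m := (PySem.Dict.mk row).getD "model" ""
      if m ≠ "" then PySem.Set.add s m else s) PySem.Set.empty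
  PySem.List.sorted2 observed (fun n => pyRank.getD n ((pyPreferred.length : Int))) (fun n => n) false

-- ===== PRECONDITION & SPEC =====
def Spec_model_order_py (rows : List (List (String × String))) (out : List String) : Prop := out = model_order_py_alt rows
instance (rows : List (List (String × String))) (out : List String) : Decidable (Spec_model_order_py rows out) := by unfold Spec_model_order_py; infer_instance

-- ===== CLAIM (what is proved, stated in full; the proofs are below) =====
def Claim_equal_model_order_py : Prop := ∀ (rows : List (List (String × String))), Dom_model_order_py rows → Spec_model_order_py rows (model_order_py rows)

-- ===== LEMMAS AND PROOFS =====

-- the two observed-set loops compute the same set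
theorem step_eq :
    (fun (s : PySem.Set String) (row : List (String × String)) =>
      match (PySem.Dict.mk row).get? "model" with
      | some m => if m ≠ "" then PySem.Set.add s ((PySem.Dict.mk row).getD "model" "") else s
      | none => s) =
    (fun (s : PySem.Set String) (row : List (String × String)) =>
      let m := (PySem.Dict.mk row).getD "model" ""
      if m ≠ "" then PySem.Set.add s m else s) := by
  funext s row
  cases h : (PySem.Dict.mk row).get? "model" <;>
    simp [PySem.Dict.getD_eq_get?_getD, h]

theorem nodup_obs (rows : List (List (String × String))) (s : PySem.Set String) (hs : s.Nodup) :
    (rows.foldl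
      (fun s row =>
        let m := (PySem.Dict.mk row).getD "model" ""
        if m ≠ "" then PySem.Set.add s m else s) s).Nodup := by
  induction rows generalizing s with
  | nil => exact hs
  | cons r t ih =>
    simp only [List.foldl_cons]
    apply ih
    split
    · exact PySem.Set.nodup_add _ _ hs
    · exact hs

theorem rank_getD_not_mem (n : String) (h : n ∉ pyPreferred) : pyRank.getD n 7 = 7 := by
  simp only [pyPreferred, List.mem_cons, not_or, List.not_mem_nil] at h
  obtain ⟨h1, h2, h3, h4, h5, h6, h7, -⟩ := h
  simp [pyRank, pyPreferred, PySem.List.enumerate, PySem.Dict.getD_insert, PySem.Dict.getD_empty,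
    h1, h2, h3, h4, h5, h6, h7]

theorem rank_lt_of_mem (n : String) (h : n ∈ pyPreferred) : pyRank.getD n 7 < 7 := by
  simp only [pyPreferred, List.mem_cons, List.not_mem_nil, or_false] at h
  rcases h with rfl | rfl | rfl | rfl | rfl | rfl | rfl <;> decide

theorem pairwise_rank : pyPreferred.Pairwise (fun a b => pyRank.getD a 7 < pyRank.getD b 7) := by
  decide

theorem sorted2_eq_sorted_lex (xs : List String) (k1 : String → Int) :
    PySem.List.sorted2 xs k1 (fun n => n) false =
      PySem.List.sorted xs (fun n => toLex (k1 n, n)) false := by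
  have hb : (fun (a b : String) => decide (k1 a < k1 b) || (!decide (k1 b < k1 a) && decide (a < b))) =
      (fun (a b : String) => decide (toLex (k1 a, a) < toLex (k1 b, b))) := by
    funext a b
    apply Bool.eq_iff_iff.mpr
    simp only [ Bool.or_eq_true, Bool.and_eq_true, Bool.not_eq_eq_eq_not,
      Bool.not_true, decide_eq_false_iff_not, decide_eq_true_eq, Prod.Lex.toLex_lt_toLex]
    constructor
    · rintro (h | ⟨h1, h2⟩)
      · exact Or.inl h
      · rcases lt_trichotomy (k1 a) (k1 b) with hlt | heq | hgt
        · exact Or.inl hlt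
        · exact Or.inr ⟨heq, h2⟩
        · exact absurd hgt h1
    · rintro (h | ⟨h1, h2⟩)
      · exact Or.inl h
      · exact Or.inr ⟨by omega, h2⟩
  simp only [PySem.List.sorted2, PySem.List.sorted, Bool.false_eq_true, if_false, hb]

-- ===== VERDICT (by name: the statement is the Claim_ definition above) =====
theorem model_order_py_spec : Claim_equal_model_order_py := by
  intro rows _
  unfold Spec_model_order_py model_order_py model_order_py_alt
  rw [step_eq]
  set obs : PySem.Set String := rows.foldl
      (fun s row =>
        let m := (PySem.Dict.mk row).getD "model" ""
        if m ≠ "" then PySem.Set.add s m else s) PySem.Set.empty with hobs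
  have hnodup : obs.Nodup := nodup_obs rows PySem.Set.empty List.nodup_nil
  have hlen : ((pyPreferred.length : Int)) = 7 := by decide
  have hof : PySem.Set.ofList pyPreferred = pyPreferred := by decide
  rw [hlen, sorted2_eq_sorted_lex]
  symm
  apply PySem.List.sorted_eq_of_perm_of_pairwise_lt
  · -- permutation
    have hpn : pyPreferred.Nodup := by decide
    have h1 : (pyPreferred.filter (fun n => PySem.Set.contains obs n)).Perm
        (obs.filter (fun x => pyPreferred.contains x)) := by
      refine (List.perm_ext_iff_of_nodup (hpn.filter _) (hnodup.filter _)).mpr ?_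
      intro x
      simp only [List.mem_filter, PySem.Set.contains, List.contains_iff_mem]
      tauto
    have h2 : (PySem.List.sorted (PySem.Set.diff obs (PySem.Set.ofList pyPreferred)) (fun x => x) false).Perm
        (obs.filter (fun x => !pyPreferred.contains x)) := by
      rw [hof]
      exact PySem.List.sorted_perm _ _ _
    exact (h1.append h2).trans (List.filter_append_perm _ obs)
  · -- pairwise strictly increasing keys
    rw [List.pairwise_append]
    have hkey_lt : ∀ a b : String, pyRank.getD a 7 < pyRank.getD b 7 →
        toLex (pyRank.getD a 7, a) < toLex (pyRank.getD b 7, b) := by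
      intro a b h
      exact Prod.Lex.toLex_lt_toLex.mpr (Or.inl h)
    refine ⟨(pairwise_rank.filter _).imp (fun h => hkey_lt _ _ h), ?_, ?_⟩
    · -- inside the sorted remainder
      have hle := PySem.List.sorted_pairwise (PySem.Set.diff obs (PySem.Set.ofList pyPreferred)) (fun x => x)
      have hnd : (PySem.List.sorted (PySem.Set.diff obs (PySem.Set.ofList pyPreferred)) (fun x => x) false).Nodup :=
        (PySem.List.sorted_perm _ _ _).nodup_iff.mpr (PySem.Set.nodup_diff _ _ hnodup)
      have hstrict := (hle.and hnd).imp (fun h => lt_of_le_of_ne h.1 h.2)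
      refine hstrict.imp_of_mem ?_
      intro a b ha hb hab
      have ha' : a ∉ pyPreferred := by
        have := ((PySem.List.mem_sorted _ _ _ _).mp ha)
        rw [hof] at this
        simp only [PySem.Set.diff, List.mem_filter, Bool.not_eq_eq_eq_not, Bool.not_true,
          PySem.Set.contains] at this
        simpa using this.2
      have hb' : b ∉ pyPreferred := by
        have := ((PySem.List.mem_sorted _ _ _ _).mp hb)
        rw [hof] at this
        simp only [PySem.Set.diff, List.mem_filter, Bool.not_eq_eq_eq_not, Bool.not_true,
          PySem.Set.contains] at this
        simpa using this.2
      rw [rank_getD_not_mem a ha', rank_getD_not_mem b hb']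
      exact Prod.Lex.toLex_lt_toLex.mpr (Or.inr ⟨rfl, hab⟩)
    · -- preferred block strictly before the rest
      intro a ha b hb
      have ha' : a ∈ pyPreferred := (List.mem_filter.mp ha).1
      have hb' : b ∉ pyPreferred := by
        have := ((PySem.List.mem_sorted _ _ _ _).mp hb)
        rw [hof] at this
        simp only [PySem.Set.diff, List.mem_filter, Bool.not_eq_eq_eq_not, Bool.not_true,
          PySem.Set.contains] at this
        simpa using this.2
      apply hkey_lt
      rw [rank_getD_not_mem b hb']
      exact rank_lt_of_mem a ha'
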